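-- pv_equiv track=rewrite | github.com/tos-kamiya/olom | olom.py | find_rect
-- ===== SOURCE A (Python) =====
-- from typing import Any, Callable, List, Optional, Tuple
--
-- def find_rect(game_field: List[int], min_length: int) -> Optional[Tuple[int, int]]:
--     """
--     Find a rectangle (a series of consecutive blocks of the same figure) in the game field.
--
--     Args:
--         game_field (List[int]): The current state of the game field.
--         min_length (int): The minimum length of a rectangle to find.
--
--     Returns:
--         Optional[tuple[int, int]]: The start and end indices of the rectangle, or None if not found.
--     """
--     for c in range(len(game_field) - min_length + 1):
--         v = game_field[c]
--         if v > 0: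
--             d = c
--             while d < len(game_field) and game_field[d] == v:
--                 d += 1
--             if d - c >= min_length:
--                 return c, d
--     return None
-- ===== SOURCE B (Python) =====
-- def find_rect(game_field, min_length):
--     n = len(game_field)
--     i = 0
--     while i < n:
--         v = game_field[i]
--         j = i + 1
--         while j < n and game_field[j] == v:
--             j += 1
--         if v > 0 and j - i >= min_length:
--             return i, j
--         i = j
--     return None
-- ===== Notes on version B (the rewrite author's own statement) =====
-- stated objective: alternative
-- what changed: B replaces A's for-loop over every start index (which rescans the same run from each of its positions) by a pass over whole runs that jumps from one run boundary to the next (i = j), checking each run once.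
import Mathlib
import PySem

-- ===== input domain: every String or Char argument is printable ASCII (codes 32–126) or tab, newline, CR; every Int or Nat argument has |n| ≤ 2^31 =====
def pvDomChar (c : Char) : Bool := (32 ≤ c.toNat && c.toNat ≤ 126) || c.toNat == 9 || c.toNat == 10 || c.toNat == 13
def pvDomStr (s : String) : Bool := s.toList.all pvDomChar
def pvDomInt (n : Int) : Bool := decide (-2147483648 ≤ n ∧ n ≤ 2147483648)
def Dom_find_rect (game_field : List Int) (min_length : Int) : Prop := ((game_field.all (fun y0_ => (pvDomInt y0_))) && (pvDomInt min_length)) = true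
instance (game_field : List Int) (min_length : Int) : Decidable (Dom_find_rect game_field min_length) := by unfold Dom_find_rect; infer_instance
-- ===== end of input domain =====

-- B replaces A's scan restarting at every index by a pass over whole runs, jumping from
-- run boundary to run boundary; equal return value on Pre_ (where Python A returns normally).

-- ===== PORT A =====
-- the inner `while d < len and game_field[d] == v: d += 1` loop, shared verbatim by A and B;
-- `fuel` only makes the while loop total (callers pass gf.length + 1, always sufficient)
def pvScanRun (gf : List Int) (v : Int) : Nat → Nat → Nat
  | 0, d => d
  | fuel + 1, d => if gf[d]? = some v then pvScanRun gf v fuel (d + 1) else d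

-- A's for-loop over range(len(game_field) - min_length + 1); `none` where Python raises
-- IndexError (excluded by Pre_)
def pvALoop (gf : List Int) (ml : Int) : List Int → Option (Int × Int)
  | [] => none
  | c :: rest =>
    match PySem.List.pyGet? gf c with
    | none => none
    | some v =>
      if 0 < v then
        let d := pvScanRun gf v (gf.length + 1) c.toNat
        if ml ≤ (d : Int) - c then some (c, (d : Int)) else pvALoop gf ml rest
      else pvALoop gf ml rest

def find_rect (game_field : List Int) (min_length : Int) : Option (Int × Int) :=
  pvALoop game_field min_length
    (PySem.List.pyRange 0 ((game_field.length : Int) - min_length + 1) 1)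

-- ===== PORT B =====
-- B's outer `while i < n` loop; i strictly increases, so fuel gf.length + 1 never runs out
def pvBLoop (gf : List Int) (ml : Int) : Nat → Nat → Option (Int × Int)
  | 0, _ => none
  | fuel + 1, i =>
    if h : i < gf.length then
      let v := gf[i]
      let j := pvScanRun gf v (gf.length + 1) (i + 1)
      if 0 < v ∧ ml ≤ (j : Int) - (i : Int) then some ((i : Int), (j : Int))
      else pvBLoop gf ml fuel j
    else none

def find_rect_alt (game_field : List Int) (min_length : Int) : Option (Int × Int) :=
  pvBLoop game_field min_length (game_field.length + 1) 0

-- ===== PRECONDITION & SPEC =====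
-- Pre_ excludes exactly the inputs on which Python A raises IndexError: min_length ≤ 0
-- with no positive entry (the for-range then runs past the end of the list).
def Pre_find_rect (game_field : List Int) (min_length : Int) : Prop :=
  1 ≤ min_length ∨ ∃ x ∈ game_field, 0 < x
instance (game_field : List Int) (min_length : Int) : Decidable (Pre_find_rect game_field min_length) := by unfold Pre_find_rect; infer_instance
def pvWitness_find_rect : List Int × Int := ([1, 1, 2], 2)

def Spec_find_rect (game_field : List Int) (min_length : Int) (out : Option (Int × Int)) : Prop := out = find_rect_alt game_field min_length
instance (game_field : List Int) (min_length : Int) (out : Option (Int × Int)) : Decidable (Spec_find_rect game_field min_length out) := by unfold Spec_find_rect; infer_instance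

-- ===== CLAIM (what is proved, stated in full; the proofs are below) =====
def Claim_equal_find_rect : Prop := ∀ (game_field : List Int) (min_length : Int), Dom_find_rect game_field min_length → Pre_find_rect game_field min_length → Spec_find_rect game_field min_length (find_rect game_field min_length)

-- ===== LEMMAS AND PROOFS =====

theorem pvScanRun_ge (gf : List Int) (v : Int) :
    ∀ (fuel d : Nat), d ≤ pvScanRun gf v fuel d := by
  intro fuel
  induction fuel with
  | zero => intro d; exact le_refl d
  | succ fuel ih =>
    intro d
    rw [pvScanRun]
    split
    · have := ih (d + 1); omega
    · exact le_refl d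

theorem pvScanRun_le (gf : List Int) (v : Int) :
    ∀ (fuel d : Nat), d ≤ gf.length → pvScanRun gf v fuel d ≤ gf.length := by
  intro fuel
  induction fuel with
  | zero => intro d hd; exact hd
  | succ fuel ih =>
    intro d hd
    rw [pvScanRun]
    split
    · rename_i h
      have hlt : d < gf.length := by
        by_contra hc
        rw [List.getElem?_eq_none (by omega)] at h
        simp at h
      exact ih (d + 1) (by omega)
    · exact hd

theorem pvScanRun_stop (gf : List Int) (v : Int) :
    ∀ (fuel d : Nat), gf.length ≤ d + fuel → ¬ gf[pvScanRun gf v fuel d]? = some v := by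
  intro fuel
  induction fuel with
  | zero =>
    intro d hd
    rw [pvScanRun, List.getElem?_eq_none (by omega)]
    simp
  | succ fuel ih =>
    intro d hd
    rw [pvScanRun]
    split
    · exact ih (d + 1) (by omega)
    · rename_i h; exact h

theorem pvScanRun_mem (gf : List Int) (v : Int) :
    ∀ (fuel d m : Nat), d ≤ m → m < pvScanRun gf v fuel d → gf[m]? = some v := by
  intro fuel
  induction fuel with
  | zero => intro d m h1 h2; rw [pvScanRun] at h2; omega
  | succ fuel ih =>
    intro d m h1 h2
    rw [pvScanRun] at h2
    split at h2
    · rename_i h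
      rcases Nat.eq_or_lt_of_le h1 with rfl | h1'
      · exact h
      · exact ih (d + 1) m h1' h2
    · omega

-- scanning starts anywhere inside a maximal run ending at j: the scan stops at j
theorem pvScanRun_eq_of (gf : List Int) (v : Int) :
    ∀ (fuel c j : Nat), c ≤ j → j - c ≤ fuel →
      (∀ m, c ≤ m → m < j → gf[m]? = some v) → ¬ gf[j]? = some v →
      pvScanRun gf v fuel c = j := by
  intro fuel
  induction fuel with
  | zero =>
    intro c j h1 h2 _ _
    rw [pvScanRun]; omega
  | succ fuel ih =>
    intro c j h1 h2 hmem hstop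
    rcases Nat.eq_or_lt_of_le h1 with rfl | hcj
    · rw [pvScanRun, if_neg hstop]
    · rw [pvScanRun, if_pos (hmem c (le_refl c) hcj)]
      exact ih (c + 1) j (by omega) (by omega) (fun m ha hb => hmem m (by omega) hb) hstop

-- A's loop skips, one index at a time, across a run it cannot use
theorem pvSkipA (gf : List Int) (v ml b : Int) :
    ∀ (k c j : Nat), j - c = k → c ≤ j → j ≤ gf.length →
      (∀ m, c ≤ m → m < j → gf[m]? = some v) → ¬ gf[j]? = some v →
      (v ≤ 0 ∨ (j : Int) - (c : Int) < ml) →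
      pvALoop gf ml (PySem.List.pyRange (c : Int) b 1) =
        pvALoop gf ml (PySem.List.pyRange (j : Int) b 1) := by
  intro k
  induction k with
  | zero =>
    intro c j hk hc _ _ _ _
    have : c = j := by omega
    subst this; rfl
  | succ k ih =>
    intro c j hk hc hjle hmem hstop hv
    have hcj : c < j := by omega
    by_cases hb : (c : Int) < b
    · rw [PySem.List.pyRange_one_cons hb]
      have hgc : gf[c]? = some v := hmem c (le_refl c) hcj
      have hget : PySem.List.pyGet? gf (c : Int) = some v := by
        rw [PySem.List.pyGet?_natCast]; exact hgc
      have hcast : (c : Int) + 1 = ((c + 1 : Nat) : Int) := by push_cast; ring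
      have hrec := ih (c + 1) j (by omega) (by omega) hjle
        (fun m h1 h2 => hmem m (by omega) h2) hstop
      by_cases hvp : 0 < v
      · have hshort : (j : Int) - (c : Int) < ml := by
          rcases hv with h | h
          · omega
          · exact h
        have hd : pvScanRun gf v (gf.length + 1) (c : Int).toNat = j := by
          rw [Int.toNat_natCast]
          exact pvScanRun_eq_of gf v (gf.length + 1) c j (by omega) (by omega) hmem hstop
        simp only [pvALoop, hget, if_pos hvp, hd]
        rw [if_neg (by omega), hcast]
        exact hrec (Or.inr (by push_cast; omega))
      · simp only [pvALoop, hget, if_neg hvp]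
        rw [hcast]
        exact hrec (Or.inl (by omega))
    · rw [PySem.List.pyRange_one_eq_nil (by omega),
          PySem.List.pyRange_one_eq_nil (by omega)]

theorem pvALoop_none_of_ge (gf : List Int) (ml : Int) (i : Nat) (h : gf.length ≤ i) :
    pvALoop gf ml (PySem.List.pyRange (i : Int) ((gf.length : Int) - ml + 1) 1) = none := by
  by_cases hb : (i : Int) < (gf.length : Int) - ml + 1
  · rw [PySem.List.pyRange_one_cons hb]
    have : PySem.List.pyGet? gf (i : Int) = none := by
      rw [PySem.List.pyGet?_natCast, List.getElem?_eq_none h]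
    simp only [pvALoop, this]
  · rw [PySem.List.pyRange_one_eq_nil (by omega)]
    rfl

theorem pvMain (gf : List Int) (ml : Int) :
    ∀ (fuel i : Nat), gf.length ≤ i + fuel →
      pvALoop gf ml (PySem.List.pyRange (i : Int) ((gf.length : Int) - ml + 1) 1) =
        pvBLoop gf ml fuel i := by
  intro fuel
  induction fuel with
  | zero =>
    intro i hf
    rw [pvALoop_none_of_ge gf ml i (by omega), pvBLoop]
  | succ fuel ih =>
    intro i hf
    by_cases hi : i < gf.length
    · set v := gf[i] with hv
      set j := pvScanRun gf v (gf.length + 1) (i + 1) with hj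
      have hji : i + 1 ≤ j := pvScanRun_ge gf v (gf.length + 1) (i + 1)
      have hjle : j ≤ gf.length := pvScanRun_le gf v (gf.length + 1) (i + 1) (by omega)
      have hstop : ¬ gf[j]? = some v := pvScanRun_stop gf v (gf.length + 1) (i + 1) (by omega)
      have hmem : ∀ m, i + 1 ≤ m → m < j → gf[m]? = some v :=
        fun m => pvScanRun_mem gf v (gf.length + 1) (i + 1) m
      rw [pvBLoop, dif_pos hi]
      simp only [← hv, ← hj]
      by_cases hb : (i : Int) < (gf.length : Int) - ml + 1
      · rw [PySem.List.pyRange_one_cons hb]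
        have hgi : gf[i]? = some v := by rw [List.getElem?_eq_getElem hi]
        have hget : PySem.List.pyGet? gf (i : Int) = some v := by
          rw [PySem.List.pyGet?_natCast]; exact hgi
        by_cases hvp : 0 < v
        · have hd : pvScanRun gf v (gf.length + 1) (i : Int).toNat = j := by
            rw [Int.toNat_natCast]
            exact pvScanRun_eq_of gf v (gf.length + 1) i j (by omega) (by omega)
              (fun m h1 h2 => by
                rcases Nat.eq_or_lt_of_le h1 with rfl | h1'
                · exact hgi
                · exact hmem m h1' h2) hstop
          simp only [pvALoop, hget, if_pos hvp, hd]
          by_cases hlen : ml ≤ (j : Int) - (i : Int)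
          · rw [if_pos hlen, if_pos ⟨hvp, hlen⟩]
          · rw [if_neg hlen, if_neg (by tauto)]
            have hcast : (i : Int) + 1 = ((i + 1 : Nat) : Int) := by push_cast; ring
            rw [hcast, pvSkipA gf v ml _ (j - (i + 1)) (i + 1) j rfl (by omega) hjle
              hmem hstop (Or.inr (by push_cast; omega))]
            exact ih j (by omega)
        · simp only [pvALoop, hget, if_neg hvp]
          rw [if_neg (by tauto)]
          have hcast : (i : Int) + 1 = ((i + 1 : Nat) : Int) := by push_cast; ring
          rw [hcast, pvSkipA gf v ml _ (j - (i + 1)) (i + 1) j rfl (by omega) hjle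
            hmem hstop (Or.inl (by omega))]
          exact ih j (by omega)
      · -- A's range is already exhausted; B's remaining runs are all too short to match
        rw [PySem.List.pyRange_one_eq_nil (by omega)]
        have hshort : ¬ ml ≤ (j : Int) - (i : Int) := by
          push_cast at hb ⊢; omega
        rw [if_neg (by tauto)]
        rw [← ih j (by omega), PySem.List.pyRange_one_eq_nil (by omega)]
    · rw [pvALoop_none_of_ge gf ml i (by omega), pvBLoop, dif_neg hi]

-- ===== VERDICT (by name: the statement is the Claim_ definition above) =====
theorem find_rect_spec : Claim_equal_find_rect := by
  intro gf ml _ _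
  unfold Spec_find_rect find_rect find_rect_alt
  have h := pvMain gf ml (gf.length + 1) 0 (by omega)
  simpa using h
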